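-- pv_equiv track=rewrite | github.com/VinayakPJadhav/Python-Assignments | Assignment2_10.py | CheckeDigit
-- ===== SOURCE A (Python) =====
-- def CheckeDigit(iNo2):
--     count=0
--     sum=0
--     while(iNo2>0):
--         iNo2=iNo2//10
--         count=count+1
--         sum=sum+count
--     return sum
-- ===== SOURCE B (Python) =====
-- def CheckeDigit(iNo2):
--     count = 0
--     p = 1
--     while p <= iNo2:
--         p = p * 10
--         count = count + 1
--     return count * (count + 1) // 2
-- ===== Notes on version B (the rewrite author's own statement) =====
-- stated objective: alternative
-- what changed: B counts digits by growing a comparison value tenfold each step against the unmodified input instead of repeatedly floor-dividing the input, and replaces A's in-loop running sum by one closed-form triangular-number expression after the loop.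
import Mathlib
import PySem

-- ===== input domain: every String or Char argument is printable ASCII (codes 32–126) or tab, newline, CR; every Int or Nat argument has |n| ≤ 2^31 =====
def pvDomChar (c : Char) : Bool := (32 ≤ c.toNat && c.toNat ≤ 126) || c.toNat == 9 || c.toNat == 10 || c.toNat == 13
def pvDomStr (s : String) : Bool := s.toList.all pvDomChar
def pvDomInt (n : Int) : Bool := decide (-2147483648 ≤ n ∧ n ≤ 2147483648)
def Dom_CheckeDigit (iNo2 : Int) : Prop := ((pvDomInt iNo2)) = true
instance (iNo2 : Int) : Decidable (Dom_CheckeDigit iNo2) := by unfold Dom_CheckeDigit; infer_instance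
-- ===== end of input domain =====

-- B counts digits by growing a comparison value tenfold against the input (instead of A's repeated floor division) and returns the closed-form triangular number (objective: alternative).


theorem pvFdiv10_toNat_lt (n : Int) (h : 0 < n) :
    (PySem.Int.floordiv n 10).toNat < n.toNat := by
  rw [PySem.Int.floordiv_eq_ediv_of_pos (by omega)]
  have hd := Int.emod_add_ediv n 10
  have hm := Int.emod_nonneg n (by omega : (10:Int) ≠ 0)
  have hm2 := Int.emod_lt_of_pos n (by omega : (0:Int) < 10)
  omega

-- ===== PORT A =====
-- while iNo2 > 0: iNo2 //= 10; count += 1; sum += count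
def CheckeDigitLoopA (iNo2 count sum : Int) : Int :=
  if h : 0 < iNo2 then
    CheckeDigitLoopA (PySem.Int.floordiv iNo2 10) (count + 1) (sum + (count + 1))
  else sum
termination_by iNo2.toNat
decreasing_by exact pvFdiv10_toNat_lt iNo2 h

def CheckeDigit (iNo2 : Int) : Int := CheckeDigitLoopA iNo2 0 0

-- ===== PORT B =====
-- while p <= iNo2: p *= 10; count += 1   (fuel only ensures termination; the guard always exits first)
def CheckeDigitLoopB (fuel : Nat) (iNo2 p count : Int) : Int :=
  match fuel with
  | 0 => count
  | Nat.succ f => if p ≤ iNo2 then CheckeDigitLoopB f iNo2 (p * 10) (count + 1) else count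

-- return count * (count + 1) // 2
def CheckeDigit_alt (iNo2 : Int) : Int :=
  let count := CheckeDigitLoopB (iNo2.toNat + 1) iNo2 1 0
  PySem.Int.floordiv (count * (count + 1)) 2

-- ===== PRECONDITION & SPEC =====
def Spec_CheckeDigit (iNo2 : Int) (out : Int) : Prop := out = CheckeDigit_alt iNo2
instance (iNo2 : Int) (out : Int) : Decidable (Spec_CheckeDigit iNo2 out) := by unfold Spec_CheckeDigit; infer_instance

-- ===== CLAIM =====
def Claim_equal_CheckeDigit : Prop := ∀ (iNo2 : Int), Dom_CheckeDigit iNo2 → Spec_CheckeDigit iNo2 (CheckeDigit iNo2)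

-- ===== LEMMAS AND PROOFS =====

-- Proof helper: the digit-count reached by A's dividing loop (ignoring the sum).
def pvDCount (n count : Int) : Int :=
  if h : 0 < n then pvDCount (PySem.Int.floordiv n 10) (count + 1) else count
termination_by n.toNat
decreasing_by exact pvFdiv10_toNat_lt n h

-- Invariant for A: twice the loop's sum result is the difference of triangular numbers.
theorem pvLoop_key (k : Nat) : ∀ (n : Int), n.toNat ≤ k → ∀ (c s : Int),
    2 * CheckeDigitLoopA n c s
      = 2 * s + pvDCount n c * (pvDCount n c + 1) - c * (c + 1) := by
  induction k with
  | zero =>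
    intro n hn c s
    have h0 : ¬ 0 < n := by omega
    rw [CheckeDigitLoopA, pvDCount]
    simp [h0]
  | succ k ih =>
    intro n hn c s
    by_cases h : 0 < n
    · have hlt := pvFdiv10_toNat_lt n h
      rw [CheckeDigitLoopA, pvDCount]
      simp only [h, dif_pos]
      have := ih (PySem.Int.floordiv n 10) (by omega) (c + 1) (s + (c + 1))
      rw [this]; ring
    · rw [CheckeDigitLoopA, pvDCount]
      simp [h]

-- B's multiplying loop computes the dividing loop's count: LoopB fuel n p c = pvDCount (n // p) c.
theorem pvLoopB_eq_DCount (fuel : Nat) : ∀ (n p c : Int), 0 < p →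
    (PySem.Int.floordiv n p).toNat < fuel →
    CheckeDigitLoopB fuel n p c = pvDCount (PySem.Int.floordiv n p) c := by
  induction fuel with
  | zero => intro n p c hp hf; omega
  | succ f ih =>
    intro n p c hp hf
    rw [CheckeDigitLoopB]
    by_cases h : p ≤ n
    · have hq1 : 1 ≤ PySem.Int.floordiv n p := by
        rw [PySem.Int.le_floordiv_iff_mul_le hp]; omega
      have hcomp : PySem.Int.floordiv (PySem.Int.floordiv n p) 10
          = PySem.Int.floordiv n (p * 10) := by
        rw [PySem.Int.floordiv_eq_ediv_of_pos hp,
            PySem.Int.floordiv_eq_ediv_of_pos (by omega : (0:Int) < 10),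
            PySem.Int.floordiv_eq_ediv_of_pos (by positivity)]
        exact Int.ediv_ediv_of_nonneg (by omega)
      have hlt := pvFdiv10_toNat_lt (PySem.Int.floordiv n p) (by omega)
      rw [hcomp] at hlt
      simp only [h, if_pos]
      rw [ih n (p * 10) (c + 1) (by positivity) (by omega)]
      conv_rhs => rw [pvDCount]
      simp only [show 0 < PySem.Int.floordiv n p by omega, dif_pos, hcomp]
    · have hq0 : PySem.Int.floordiv n p ≤ 0 := by
        by_contra hc
        have : 1 ≤ PySem.Int.floordiv n p := by omega
        rw [PySem.Int.le_floordiv_iff_mul_le hp] at this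
        omega
      simp only [h, if_false]
      rw [pvDCount]
      simp [show ¬ 0 < PySem.Int.floordiv n p by omega]

-- ===== VERDICT =====
theorem CheckeDigit_spec : Claim_equal_CheckeDigit := by
  intro n _
  unfold Spec_CheckeDigit CheckeDigit CheckeDigit_alt
  have hdiv1 : PySem.Int.floordiv n 1 = n := by
    rw [PySem.Int.floordiv_eq_ediv_of_pos (by omega : (0:Int) < 1)]
    exact Int.ediv_one n
  have hB := pvLoopB_eq_DCount (n.toNat + 1) n 1 0 (by omega) (by rw [hdiv1]; omega)
  rw [hdiv1] at hB
  have hkey := pvLoop_key n.toNat n (le_refl _) 0 0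
  set c := pvDCount n 0 with hc
  have h2 : 2 * CheckeDigitLoopA n 0 0 = c * (c + 1) := by rw [hkey]; ring
  simp only [hB]
  rw [PySem.Int.floordiv_eq_ediv_of_pos (by omega : (0:Int) < 2), ← h2]
  omega
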